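-- pv_equiv track=rewrite | github.com/googleapis/protoc-java-resource-names-plugin | plugin/utils/gapic_utils.py | build_parent_patterns
-- ===== SOURCE A (Python) =====
-- def build_parent_patterns(patterns):
--     def _parent_pattern(pattern):
--         segs = pattern.split('/')
--         last_index = len(segs) - 2
--         while last_index >= 0 and not _is_variable_segment(segs[last_index]):
--             last_index -= 1
--         last_index += 1
--         return '/'.join(segs[:last_index])
--     return [_parent_pattern(p) for p in patterns if not(isFixedPattern(p))]
--
-- def _is_variable_segment(segment):
--     return len(segment) > 0 and segment[0] == '{' and segment[-1] == '}'
--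
-- def isFixedPattern(pattern):
--     return not('{' in pattern or '*' in pattern)
-- ===== SOURCE B (Python) =====
-- def build_parent_patterns(patterns):
--     def _parent_segs(segs):
--         # recursive: parent of segs = head consed onto parent of tail when the
--         # tail still yields a parent; otherwise [head] iff head is a variable segment
--         if len(segs) <= 1:
--             return []
--         sub = _parent_segs(segs[1:])
--         if sub:
--             return [segs[0]] + sub
--         return [segs[0]] if _is_variable_segment(segs[0]) else []
--     return ['/'.join(_parent_segs(p.split('/'))) for p in patterns if not isFixedPattern(p)]
--
-- def _is_variable_segment(segment):
--     return len(segment) > 0 and segment[0] == '{' and segment[-1] == '}'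
--
-- def isFixedPattern(pattern):
--     return not('{' in pattern or '*' in pattern)
-- ===== Notes on version B (the rewrite author's own statement) =====
-- stated objective: alternative
-- what changed: A computes a numeric cut index by walking backward over the segment array and then slices and joins; B has no index arithmetic at all: a recursive function on the segment list builds the parent segment list itself top-down (cons the head onto the tail's parent when that is non-empty, else keep the head exactly when it is a variable segment), which is then joined.
import Mathlib
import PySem

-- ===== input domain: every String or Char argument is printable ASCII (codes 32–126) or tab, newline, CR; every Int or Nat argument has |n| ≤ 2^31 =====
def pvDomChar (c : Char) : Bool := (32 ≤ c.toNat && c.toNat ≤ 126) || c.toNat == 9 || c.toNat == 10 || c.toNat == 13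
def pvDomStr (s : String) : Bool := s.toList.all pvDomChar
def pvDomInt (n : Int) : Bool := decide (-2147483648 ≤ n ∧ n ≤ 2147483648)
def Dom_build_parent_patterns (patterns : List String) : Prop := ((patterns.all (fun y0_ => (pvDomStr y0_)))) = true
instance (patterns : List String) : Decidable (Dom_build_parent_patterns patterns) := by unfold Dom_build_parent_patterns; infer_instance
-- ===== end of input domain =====

-- B replaces A's backward index scan + slice + join by a structural recursion on the
-- segment list that builds the parent segment list directly, with no index arithmetic ('alternative').

-- ===== PORT A =====
-- _is_variable_segment: len(segment) > 0 and segment[0] == '{' and segment[-1] == '}'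
-- (the indexings are guarded by the length test, so pyGetD with a dummy default is exact)
def pvIsVariableSegment (segment : List Char) : Bool :=
  decide (0 < segment.length) && (PySem.List.pyGetD segment 0 ' ' == '{')
    && (PySem.List.pyGetD segment (-1) ' ' == '}')

-- isFixedPattern: not('{' in pattern or '*' in pattern)
def pvIsFixedPattern (pattern : List Char) : Bool :=
  !(PySem.Chars.isIn ['{'] pattern || PySem.Chars.isIn ['*'] pattern)

-- the while-loop of _parent_pattern: decrement last_index while it is ≥ 0 and not variable
def pvALoop (segs : List (List Char)) (i : Int) : Int :=
  if h : 0 ≤ i ∧ ¬ (pvIsVariableSegment (PySem.List.pyGetD segs i []) = true) then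
    pvALoop segs (i - 1)
  else i
termination_by (i + 1).toNat
decreasing_by omega

def pvParentPatternA (pattern : List Char) : List Char :=
  let segs := PySem.Chars.splitOn pattern ['/']
  let lastIndex := pvALoop segs ((segs.length : Int) - 2)
  PySem.Chars.join ['/'] (PySem.List.slice segs none (some (lastIndex + 1)))

def build_parent_patterns (patterns : List String) : List String :=
  (patterns.filter (fun p => !(pvIsFixedPattern p.toList))).map
    (fun p => String.ofList (pvParentPatternA p.toList))

-- ===== PORT B =====
-- _parent_segs: recursion on the segment list; 'if len(segs) <= 1: return []',
-- otherwise cons the head onto the non-empty parent of the tail, else [head] iff head is variable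
def pvParentSegs : List (List Char) → List (List Char)
  | [] => []
  | s :: t =>
    if (s :: t).length ≤ 1 then []
    else
      let sub := pvParentSegs t
      if sub ≠ [] then s :: sub
      else if pvIsVariableSegment s then [s] else []

def pvParentPatternB (pattern : List Char) : List Char :=
  PySem.Chars.join ['/'] (pvParentSegs (PySem.Chars.splitOn pattern ['/']))

def build_parent_patterns_alt (patterns : List String) : List String :=
  (patterns.filter (fun p => !(pvIsFixedPattern p.toList))).map
    (fun p => String.ofList (pvParentPatternB p.toList))

-- ===== PRECONDITION & SPEC =====
def Spec_build_parent_patterns (patterns : List String) (out : List String) : Prop := out = build_parent_patterns_alt patterns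
instance (patterns : List String) (out : List String) : Decidable (Spec_build_parent_patterns patterns out) := by unfold Spec_build_parent_patterns; infer_instance

-- ===== CLAIM (what is proved, stated in full; the proofs are below) =====
def Claim_equal_build_parent_patterns : Prop := ∀ (patterns : List String), Dom_build_parent_patterns patterns → Spec_build_parent_patterns patterns (build_parent_patterns patterns)

-- ===== LEMMAS AND PROOFS =====

lemma pvALoop_neg (segs : List (List Char)) (i : Int) (h : i < 0) : pvALoop segs i = i := by
  rw [pvALoop, dif_neg (fun hc => absurd hc.1 (by omega))]

lemma pvALoop_stop (segs : List (List Char)) (i : Int)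
    (h : ¬ (0 ≤ i ∧ ¬ (pvIsVariableSegment (PySem.List.pyGetD segs i []) = true))) :
    pvALoop segs i = i := by
  rw [pvALoop, dif_neg h]

lemma pvALoop_go (segs : List (List Char)) (i : Int)
    (h : 0 ≤ i ∧ ¬ (pvIsVariableSegment (PySem.List.pyGetD segs i []) = true)) :
    pvALoop segs i = pvALoop segs (i - 1) := by
  rw [pvALoop, dif_pos h]

lemma pvGetD_cons_succ (s : List Char) (t : List (List Char)) (n : Nat) :
    PySem.List.pyGetD (s :: t) ((n : Int) + 1) [] = PySem.List.pyGetD t (n : Int) [] := by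
  have h : ((n : Int) + 1) = ((n + 1 : Nat) : Int) := by push_cast; ring
  rw [h, PySem.List.pyGetD_natCast, PySem.List.pyGetD_natCast]
  simp [List.getD]

lemma pvGetD_cast_zero_cons (s : List Char) (t : List (List Char)) :
    PySem.List.pyGetD (s :: t) (((0 : Nat) : Int)) [] = s := by
  simp [PySem.List.pyGetD_zero_cons]

-- the backward loop on s :: t started at n + 1, in terms of the loop on t started at n
lemma pvALoop_shift (s : List Char) (t : List (List Char)) : ∀ n : Nat,
    pvALoop (s :: t) ((n : Int) + 1)
      = (if 0 ≤ pvALoop t (n : Int) then pvALoop t (n : Int) + 1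
         else if pvIsVariableSegment s then 0 else -1) := by
  intro n
  induction n with
  | zero =>
    have hg : PySem.List.pyGetD (s :: t) (((0 : Nat) : Int) + 1) []
        = PySem.List.pyGetD t ((0 : Nat) : Int) [] := pvGetD_cons_succ s t 0
    by_cases hv : pvIsVariableSegment (PySem.List.pyGetD t ((0 : Nat) : Int) []) = true
    · have l1 : pvALoop t ((0 : Nat) : Int) = ((0 : Nat) : Int) :=
        pvALoop_stop _ _ (fun hc => hc.2 hv)
      have l2 : pvALoop (s :: t) (((0 : Nat) : Int) + 1) = ((0 : Nat) : Int) + 1 :=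
        pvALoop_stop _ _ (fun hc => hc.2 (by rw [hg]; exact hv))
      rw [l1, l2, if_pos (by omega)]
    · have l1 : pvALoop t ((0 : Nat) : Int) = -1 := by
        rw [pvALoop_go _ _ ⟨by omega, hv⟩]
        have h0 : ((0 : Nat) : Int) - 1 = -1 := by norm_num
        rw [h0]; exact pvALoop_neg _ _ (by omega)
      have l2 : pvALoop (s :: t) (((0 : Nat) : Int) + 1) = pvALoop (s :: t) ((0 : Nat) : Int) := by
        rw [pvALoop_go _ _ ⟨by omega, by rw [hg]; exact hv⟩]
        congr 1
      by_cases hs : pvIsVariableSegment s = true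
      · have l3 : pvALoop (s :: t) ((0 : Nat) : Int) = ((0 : Nat) : Int) :=
          pvALoop_stop _ _ (by rw [pvGetD_cast_zero_cons]; simp [hs])
        rw [l2, l3, l1]; norm_num [hs]
      · have l3 : pvALoop (s :: t) ((0 : Nat) : Int) = -1 := by
          rw [pvALoop_go _ _ ⟨by omega, by rw [pvGetD_cast_zero_cons]; exact hs⟩]
          have h0 : ((0 : Nat) : Int) - 1 = -1 := by norm_num
          rw [h0]; exact pvALoop_neg _ _ (by omega)
        rw [l2, l3, l1]; norm_num [hs]
  | succ m ih =>
    have hg : PySem.List.pyGetD (s :: t) (((m + 1 : Nat) : Int) + 1) []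
        = PySem.List.pyGetD t ((m + 1 : Nat) : Int) [] := pvGetD_cons_succ s t (m + 1)
    by_cases hv : pvIsVariableSegment (PySem.List.pyGetD t ((m + 1 : Nat) : Int) []) = true
    · have l1 : pvALoop t ((m + 1 : Nat) : Int) = ((m + 1 : Nat) : Int) :=
        pvALoop_stop _ _ (fun hc => hc.2 hv)
      have l2 : pvALoop (s :: t) (((m + 1 : Nat) : Int) + 1) = ((m + 1 : Nat) : Int) + 1 :=
        pvALoop_stop _ _ (fun hc => hc.2 (by rw [hg]; exact hv))
      rw [l1, l2, if_pos (by omega)]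
    · have l1 : pvALoop t ((m + 1 : Nat) : Int) = pvALoop t ((m : Nat) : Int) := by
        rw [pvALoop_go _ _ ⟨by omega, hv⟩]
        congr 1; omega
      have l2 : pvALoop (s :: t) (((m + 1 : Nat) : Int) + 1)
          = pvALoop (s :: t) (((m : Nat) : Int) + 1) := by
        rw [pvALoop_go _ _ ⟨by omega, by rw [hg]; exact hv⟩]
        congr 1; omega
      rw [l2, ih, l1]

lemma pvALoop_ge (t : List (List Char)) : ∀ n : Nat, (-1 : Int) ≤ pvALoop t ((n : Int) - 1) := by
  intro n
  induction n with
  | zero => rw [pvALoop_neg t _ (by norm_num)]; norm_num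
  | succ m ih =>
    have h : ((m + 1 : Nat) : Int) - 1 = (m : Int) := by push_cast; ring
    rw [h, pvALoop]
    split_ifs with hc
    · have h2 : (m : Int) - 1 = ((m : Nat) : Int) - 1 := by norm_num
      rw [h2]; exact ih
    · omega

lemma pvALoop_ge' (t : List (List Char)) (n : Nat) : (-1 : Int) ≤ pvALoop t (n : Int) := by
  have h : ((n + 1 : Nat) : Int) - 1 = (n : Int) := by push_cast; ring
  have hx := pvALoop_ge t (n + 1)
  rwa [h] at hx

lemma pvParentSegs_single (s : List Char) : pvParentSegs [s] = [] := by
  rw [pvParentSegs]; simp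

lemma pvParentSegs_cons₂ (s u : List Char) (v : List (List Char)) :
    pvParentSegs (s :: u :: v)
      = (if pvParentSegs (u :: v) ≠ [] then s :: pvParentSegs (u :: v)
         else if pvIsVariableSegment s then [s] else []) := by
  conv_lhs => rw [pvParentSegs]
  rw [if_neg (by simp)]

-- B's recursion computes exactly the prefix A cuts out
lemma pvParentSegs_eq_take (segs : List (List Char)) :
    pvParentSegs segs = segs.take (pvALoop segs ((segs.length : Int) - 2) + 1).toNat := by
  induction segs with
  | nil => simp [pvParentSegs]
  | cons s t ih =>
    cases t with
    | nil =>
      have h : (([s] : List (List Char)).length : Int) - 2 = -1 := by norm_num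
      rw [h, pvALoop_neg _ _ (by norm_num), pvParentSegs_single]
      simp
    | cons u v =>
      cases v with
      | nil =>
        have hidx : (((s :: [u]) : List (List Char)).length : Int) - 2 = ((0 : Nat) : Int) := by
          norm_num
        rw [hidx, pvParentSegs_cons₂, pvParentSegs_single, if_neg (by simp)]
        by_cases hs : pvIsVariableSegment s = true
        · have l : pvALoop (s :: [u]) ((0 : Nat) : Int) = ((0 : Nat) : Int) :=
            pvALoop_stop _ _ (by rw [pvGetD_cast_zero_cons]; simp [hs])
          rw [l, if_pos hs]; simp
        · have l : pvALoop (s :: [u]) ((0 : Nat) : Int) = -1 := by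
            rw [pvALoop_go _ _ ⟨by omega, by rw [pvGetD_cast_zero_cons]; exact hs⟩]
            have h0 : ((0 : Nat) : Int) - 1 = -1 := by norm_num
            rw [h0]; exact pvALoop_neg _ _ (by omega)
          rw [l, if_neg hs]; simp
      | cons w x =>
        have hidx : (((s :: u :: w :: x) : List (List Char)).length : Int) - 2
            = ((x.length : Nat) : Int) + 1 := by
          push_cast [List.length_cons]; ring
        have hidx2 : (((u :: w :: x) : List (List Char)).length : Int) - 2
            = ((x.length : Nat) : Int) := by
          push_cast [List.length_cons]; ring
        rw [hidx, pvALoop_shift s (u :: w :: x) x.length, pvParentSegs_cons₂]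
        rw [hidx2] at ih
        have hge : (-1 : Int) ≤ pvALoop (u :: w :: x) ((x.length : Nat) : Int) :=
          pvALoop_ge' _ _
        set r := pvALoop (u :: w :: x) ((x.length : Nat) : Int) with hr
        by_cases h0 : 0 ≤ r
        · have ht1 : (r + 1).toNat = r.toNat + 1 := by omega
          have hsub : pvParentSegs (u :: w :: x) ≠ [] := by rw [ih, ht1]; simp
          rw [if_pos hsub, if_pos h0, ih]
          have ht2 : (r + 1 + 1).toNat = (r + 1).toNat + 1 := by omega
          rw [ht2, List.take_succ_cons]
        · have hr1 : r = -1 := by omega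
          have hsub : pvParentSegs (u :: w :: x) = [] := by rw [ih, hr1]; simp
          rw [if_neg (by simp [hsub]), if_neg h0]
          by_cases hs : pvIsVariableSegment s = true
          · rw [if_pos hs, if_pos hs]; simp
          · rw [if_neg hs, if_neg hs]; simp

lemma pv_parent_eq (p : List Char) : pvParentPatternA p = pvParentPatternB p := by
  simp only [pvParentPatternA, pvParentPatternB]
  cases hsegs : PySem.Chars.splitOn p ['/'] with
  | nil => simp [pvALoop_neg _ (-2 : Int) (by norm_num), PySem.List.slice,
      PySem.List.clampIdx, pvParentSegs]
  | cons s t =>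
    have hlen : (((s :: t) : List (List Char)).length : Int) - 2
        = (((s :: t).length - 1 : Nat) : Int) - 1 := by
      push_cast [List.length_cons]; omega
    have hge : (-1 : Int) ≤ pvALoop (s :: t) (((s :: t).length : Int) - 2) := by
      rw [hlen]; exact pvALoop_ge (s :: t) ((s :: t).length - 1)
    rw [PySem.List.slice_to _ (by omega), pvParentSegs_eq_take]

-- ===== VERDICT (by name: the statement is the Claim_ definition above) =====
theorem build_parent_patterns_spec : Claim_equal_build_parent_patterns := by
  intro patterns _
  unfold Spec_build_parent_patterns build_parent_patterns build_parent_patterns_alt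
  simp [pv_parent_eq]
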